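-- pv_equiv track=rewrite | github.com/t-tsekov/codefights-solutions | arcade/the-core/labyrinth-of-nested-loops/weakNumbers.py | weakNumbers
-- ===== SOURCE A (Python) =====
-- def weakNumbers(n):
--     divisors = [-1] * (n + 2)
--     weakness = [-1] * (n + 2)
--     count = 0
--     divisors[1] = 1
--     weakness[1] = 0
--     for i in range(2, n + 1):
--         divisors[i] = get_divisors(i)
--         for j in range(1, i):
--             if divisors[j] > divisors[i]:
--                 count += 1
--         weakness[i] = count
--         count = 0
--
--     max_weakness = max(weakness)
--     max_weakness_count = weakness.count(max_weakness)
--     return [max_weakness, max_weakness_count]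
--
-- def get_divisors(x):
--     count = 0
--     i = 1
--     for i in range(1, x + 1):
--         if x % i == 0:
--             count += 1
--     return count
-- ===== SOURCE B (Python) =====
-- def weakNumbers(n):
--     # divisor counts for 1..n by a sieve (add 1 to every multiple of each i)
--     d = [0] * (n + 1)
--     for i in range(1, n + 1):
--         for j in range(i, n + 1, i):
--             d[j] += 1
--     # freq: divisor-count value -> how many numbers seen so far have it
--     freq = {1: 1}            # the number 1 has exactly one divisor; its weakness is 0
--     best, best_count = 0, 1
--     for i in range(2, n + 1):
--         di = d[i]
--         w = sum(c for v, c in freq.items() if v > di)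
--         if w > best:
--             best, best_count = w, 1
--         elif w == best:
--             best_count += 1
--         freq[di] = freq.get(di, 0) + 1
--     return [best, best_count]
-- ===== Notes on version B (the rewrite author's own statement) =====
-- stated objective: faster
-- what changed: Divisor counts are computed by one sieve over multiples instead of per-number trial division, each number's weakness is obtained from a frequency dictionary of divisor-count values seen so far instead of rescanning all predecessors, and the maximum weakness and its multiplicity are tracked with a running (best, count) pair instead of building a padded array and calling max/count on it.
import Mathlib
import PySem

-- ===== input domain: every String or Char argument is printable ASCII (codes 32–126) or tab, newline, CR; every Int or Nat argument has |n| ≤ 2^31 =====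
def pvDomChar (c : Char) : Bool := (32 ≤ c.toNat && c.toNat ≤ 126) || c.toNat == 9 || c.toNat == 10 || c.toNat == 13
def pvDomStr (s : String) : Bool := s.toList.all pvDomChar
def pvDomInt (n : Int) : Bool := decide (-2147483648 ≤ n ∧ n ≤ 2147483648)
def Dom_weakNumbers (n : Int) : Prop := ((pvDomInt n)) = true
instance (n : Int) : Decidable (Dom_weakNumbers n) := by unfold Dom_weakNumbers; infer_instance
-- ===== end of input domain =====

-- B replaces A's per-number trial division and per-number rescan of all predecessors by a
-- divisor-count sieve plus a frequency dictionary and a running (best, count) pair (objective: faster).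

-- ===== PORT A =====
def get_divisors (x : Int) : Int :=
  (PySem.List.pyRange 1 (x + 1)).foldl
    (fun count i => if PySem.Int.mod x i == 0 then count + 1 else count) 0

def weakNumbers (n : Int) : List Int :=
  let divisors := PySem.List.pyRepeat [(-1 : Int)] (n + 2)
  let weakness := PySem.List.pyRepeat [(-1 : Int)] (n + 2)
  -- divisors[1] = 1 / weakness[1] = 0: Python raises IndexError when n < 0 (excluded by Pre_);
  -- inside Pre_ the index is in range, where List.set is exact.
  let divisors := divisors.set 1 1
  let weakness := weakness.set 1 0
  let st := (PySem.List.pyRange 2 (n + 1)).foldl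
    (fun (st : List Int × List Int) i =>
      let divisors := st.1.set i.toNat (get_divisors i)
      let count := (PySem.List.pyRange 1 i).foldl
        (fun count j =>
          if PySem.List.pyGetD divisors j 0 > PySem.List.pyGetD divisors i 0 then count + 1
          else count) 0
      (divisors, st.2.set i.toNat count))
    (divisors, weakness)
  let weakness := st.2
  -- max(weakness): the list is nonempty for every n ≥ 0, so the none branch is unreachable inside Pre_
  let max_weakness := match PySem.List.max? weakness (fun x => x) with
    | some m => m
    | none => 0
  [max_weakness, (PySem.List.count weakness max_weakness : Int)]

-- ===== PORT B =====
def weakNumbers_alt (n : Int) : List Int :=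
  let d := (PySem.List.pyRange 1 (n + 1)).foldl
    (fun d i => (PySem.List.pyRange i (n + 1) i).foldl
        (fun d j => d.set j.toNat (PySem.List.pyGetD d j 0 + 1)) d)
    (PySem.List.pyRepeat [(0 : Int)] (n + 1))
  let st := (PySem.List.pyRange 2 (n + 1)).foldl
    (fun (st : PySem.Dict Int Int × Int × Int) i =>
      let freq := st.1
      let best := st.2.1
      let best_count := st.2.2
      let di := PySem.List.pyGetD d i 0
      let w := ((freq.items.filter (fun vc => vc.1 > di)).map (fun vc => vc.2)).sum
      let bp : Int × Int :=
        if w > best then (w, 1)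
        else if w == best then (best, best_count + 1)
        else (best, best_count)
      (freq.insert di (freq.getD di 0 + 1), bp))
    (PySem.Dict.empty.insert 1 1, 0, 1)
  [st.2.1, st.2.2]

-- ===== PRECONDITION & SPEC =====
-- Pre_ excludes exactly n < 0, where the Python A raises IndexError at 'divisors[1] = 1'.
def Pre_weakNumbers (n : Int) : Prop := 0 ≤ n
instance (n : Int) : Decidable (Pre_weakNumbers n) := by unfold Pre_weakNumbers; infer_instance
def pvWitness_weakNumbers : Int := (3)

def Spec_weakNumbers (n : Int) (out : List Int) : Prop := out = weakNumbers_alt n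
instance (n : Int) (out : List Int) : Decidable (Spec_weakNumbers n out) := by
  unfold Spec_weakNumbers; infer_instance

-- ===== CLAIM (what is proved, stated in full; the proofs are below) =====
def Claim_equal_weakNumbers : Prop :=
  ∀ (n : Int), Dom_weakNumbers n → Pre_weakNumbers n → Spec_weakNumbers n (weakNumbers n)

-- ===== LEMMAS AND PROOFS =====

-- weakness of i: how many j in 1..i-1 have more divisors than i
def Wk (i : Int) : Int :=
  ((PySem.List.pyRange 1 i).countP (fun j => decide (get_divisors j > get_divisors i)) : Int)

-- B's sieve list (proof-side name for the first fold of weakNumbers_alt)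
def sieveD (n : Int) : List Int :=
  (PySem.List.pyRange 1 (n + 1)).foldl
    (fun d i => (PySem.List.pyRange i (n + 1) i).foldl
        (fun d j => d.set j.toNat (PySem.List.pyGetD d j 0 + 1)) d)
    (PySem.List.pyRepeat [(0 : Int)] (n + 1))

-- B's running (best, best_count) step
def pstep (s : Int × Int) (w : Int) : Int × Int :=
  if w > s.1 then (w, 1) else if w == s.1 then (s.1, s.2 + 1) else s

-- ---------- pyRange with step 1 ----------
theorem pyRange_one_eq (a b : Int) :
    PySem.List.pyRange a b = (List.range (b - a).toNat).map (fun k : Nat => a + (k : Int)) := by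
  rw [PySem.List.pyRange_of_pos a b (by norm_num : (0:Int) < 1)]
  by_cases h : a < b
  · simp only [h, if_true]; norm_num
  · have h0 : (b - a).toNat = 0 := by omega
    simp [h, h0]

theorem length_pyRange_one (a b : Int) :
    (PySem.List.pyRange a b).length = (b - a).toNat := by
  rw [pyRange_one_eq]; simp

theorem getElem_pyRange_one (a b : Int) (k : Nat) (hk : k < (b - a).toNat) :
    (PySem.List.pyRange a b)[k]'(by rw [length_pyRange_one]; exact hk) = a + (k : Int) := by
  have h := pyRange_one_eq a b
  simp [h]

-- ---------- list surgery ----------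
theorem set_append_len {α : Type} (xs : List α) (y v : α) (zs : List α) :
    (xs ++ y :: zs).set xs.length v = xs ++ v :: zs := by
  induction xs with
  | nil => simp
  | cons x xs ih => simp [List.set_cons_succ, ih]

theorem set_append_len' {α : Type} (xs : List α) (k : Nat) (y v : α) (zs : List α)
    (h : k = xs.length) : (xs ++ y :: zs).set k v = xs ++ v :: zs := by
  subst h; exact set_append_len xs y v zs

-- reading a divisor value from A's partially filled array
theorem lookup_dv (B x : Int) (rest : List Int) (hx1 : 1 ≤ x) (hx2 : x < B) :
    PySem.List.pyGetD ((-1) :: (List.map get_divisors (PySem.List.pyRange 1 B) ++ rest)) x 0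
      = get_divisors x := by
  rw [PySem.List.pyGetD_of_nonneg _ _ (by omega)]
  obtain ⟨k, hk⟩ : ∃ k : Nat, x.toNat = k + 1 := ⟨x.toNat - 1, by omega⟩
  rw [hk, List.getD_cons_succ]
  have hklen : k < (List.map get_divisors (PySem.List.pyRange 1 B)).length := by
    rw [List.length_map, length_pyRange_one]; omega
  rw [List.getD_eq_getElem _ _ (by simpa using (by rw [List.length_append]; omega :
        k < ((List.map get_divisors (PySem.List.pyRange 1 B)) ++ rest).length))]
  rw [List.getElem_append_left hklen, List.getElem_map]
  have := getElem_pyRange_one 1 B k (by omega)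
  rw [this]
  congr 1
  omega

-- ---------- A's loop ----------
theorem A_loop (n : Int) (hn : 1 ≤ n) :
    ∀ m : Nat, (m : Int) ≤ n - 1 →
    (PySem.List.pyRange 2 (2 + (m : Int))).foldl
      (fun (st : List Int × List Int) i =>
        let divisors := st.1.set i.toNat (get_divisors i)
        let count := (PySem.List.pyRange 1 i).foldl
          (fun count j =>
            if PySem.List.pyGetD divisors j 0 > PySem.List.pyGetD divisors i 0 then count + 1
            else count) 0
        (divisors, st.2.set i.toNat count))
      ((PySem.List.pyRepeat [(-1 : Int)] (n + 2)).set 1 1,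
       (PySem.List.pyRepeat [(-1 : Int)] (n + 2)).set 1 0)
    = ( (-1) :: (List.map get_divisors (PySem.List.pyRange 1 (2 + (m : Int)))
            ++ List.replicate (n - m).toNat (-1)),
        (-1) :: 0 :: (List.map Wk (PySem.List.pyRange 2 (2 + (m : Int)))
            ++ List.replicate (n - m).toNat (-1)) ) := by
  intro m
  induction m with
  | zero =>
    intro _
    rw [show PySem.List.pyRange 2 (2 + ((0:Nat) : Int)) = [] from by decide,
        show PySem.List.pyRange 1 (2 + ((0:Nat) : Int)) = [1] from by decide]
    rw [List.foldl_nil, List.map_cons, List.map_nil, List.map_nil]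
    rw [show get_divisors 1 = 1 from by decide]
    rw [PySem.List.pyRepeat_singleton, show (n + 2).toNat = n.toNat + 2 from by omega,
        List.replicate_succ, List.replicate_succ, List.set_cons_succ, List.set_cons_zero,
        List.set_cons_succ, List.set_cons_zero]
    rw [show (n - ((0:Nat) : Int)).toNat = n.toNat from by norm_num]
    simp
  | succ m ihm =>
    intro h
    set i : Int := 2 + (m : Int) with hidef
    have h2i : (2 : Int) ≤ i := by omega
    have hin : i ≤ n := by omega
    rw [show (2 + ((m + 1 : Nat) : Int)) = i + 1 from by push_cast; omega]
    conv_lhs => rw [PySem.List.pyRange_one_succ_right h2i]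
    rw [List.foldl_append, ihm (by omega), List.foldl_cons, List.foldl_nil]
    simp only []
    -- split the trailing replicate block
    rw [show (n - (m : Int)).toNat = (n - ((m : Int) + 1)).toNat + 1 from by omega,
        List.replicate_succ]
    -- regroup both lists as prefix ++ (-1) :: suffix
    rw [show ((-1 : Int) :: (List.map get_divisors (PySem.List.pyRange 1 i)
          ++ (-1) :: List.replicate (n - ((m : Int) + 1)).toNat (-1)))
        = ((-1 : Int) :: List.map get_divisors (PySem.List.pyRange 1 i))
          ++ (-1) :: List.replicate (n - ((m : Int) + 1)).toNat (-1) from by simp]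
    rw [show ((-1 : Int) :: 0 :: (List.map Wk (PySem.List.pyRange 2 i)
          ++ (-1) :: List.replicate (n - ((m : Int) + 1)).toNat (-1)))
        = ((-1 : Int) :: 0 :: List.map Wk (PySem.List.pyRange 2 i))
          ++ (-1) :: List.replicate (n - ((m : Int) + 1)).toNat (-1) from by simp]
    rw [set_append_len' _ _ _ _ _ (by simp [length_pyRange_one]; omega :
          i.toNat = ((-1 : Int) :: List.map get_divisors (PySem.List.pyRange 1 i)).length)]
    rw [set_append_len' _ _ _ _ _ (by simp [length_pyRange_one]; omega :
          i.toNat = ((-1 : Int) :: 0 :: List.map Wk (PySem.List.pyRange 2 i)).length)]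
    -- the updated divisors list in its prefix form
    rw [show (((-1 : Int) :: List.map get_divisors (PySem.List.pyRange 1 i))
          ++ get_divisors i :: List.replicate (n - ((m : Int) + 1)).toNat (-1))
        = (-1 : Int) :: (List.map get_divisors (PySem.List.pyRange 1 (i + 1))
          ++ List.replicate (n - ((m : Int) + 1)).toNat (-1)) from by
      rw [PySem.List.pyRange_one_succ_right (by omega : (1:Int) ≤ i), List.map_append]
      simp]
    -- the inner loop computes Wk i
    rw [show (PySem.List.pyRange 1 i).foldl
        (fun count j =>
          if PySem.List.pyGetD ((-1 : Int) :: (List.map get_divisors (PySem.List.pyRange 1 (i + 1))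
              ++ List.replicate (n - ((m : Int) + 1)).toNat (-1))) j 0
             > PySem.List.pyGetD ((-1 : Int) :: (List.map get_divisors (PySem.List.pyRange 1 (i + 1))
              ++ List.replicate (n - ((m : Int) + 1)).toNat (-1))) i 0 then count + 1
          else count) 0 = Wk i from by
      rw [lookup_dv (i + 1) i _ (by omega) (by omega)]
      rw [PySem.List.foldl_ite_add_one
        (p := fun j => PySem.List.pyGetD ((-1 : Int) :: (List.map get_divisors (PySem.List.pyRange 1 (i + 1))
              ++ List.replicate (n - ((m : Int) + 1)).toNat (-1))) j 0 > get_divisors i)]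
      rw [zero_add, Wk]
      congr 1
      apply List.countP_congr
      intro j hj
      rw [PySem.List.mem_pyRange_one] at hj
      rw [lookup_dv (i + 1) j _ (by omega) (by omega)]]
    -- the updated weakness list in its prefix form
    rw [show (((-1 : Int) :: 0 :: List.map Wk (PySem.List.pyRange 2 i))
          ++ Wk i :: List.replicate (n - ((m : Int) + 1)).toNat (-1))
        = (-1 : Int) :: 0 :: (List.map Wk (PySem.List.pyRange 2 (i + 1))
          ++ List.replicate (n - ((m : Int) + 1)).toNat (-1)) from by
      rw [PySem.List.pyRange_one_succ_right (by omega : (2:Int) ≤ i), List.map_append]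
      simp]
    rw [show (n - ((m + 1 : Nat) : Int)).toNat = (n - ((m : Int) + 1)).toNat from by push_cast; omega]

-- ---------- B's sieve ----------
theorem mem_pyRange_step (i x n : Int) (hi : 1 ≤ i) :
    x ∈ PySem.List.pyRange i (n + 1) i ↔ (i ≤ x ∧ x ≤ n ∧ i ∣ x) := by
  rw [PySem.List.mem_pyRange_iff_of_pos (by omega)]
  constructor
  · rintro ⟨h1, h2, h3⟩
    refine ⟨h1, by omega, ?_⟩
    have := dvd_add h3 (dvd_refl i)
    simpa using this
  · rintro ⟨h1, h2, h3⟩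
    exact ⟨h1, by omega, dvd_sub h3 (dvd_refl i)⟩

theorem nodup_pyRange_step (i n : Int) (hi : 1 ≤ i) :
    (PySem.List.pyRange i (n + 1) i).Nodup := by
  rw [PySem.List.pyRange_of_pos _ _ (by omega : (0:Int) < i)]
  apply List.Nodup.map
  · intro k1 k2 h
    simp only at h
    have : (k1 : Int) = (k2 : Int) := by
      have hi0 : i ≠ 0 := by omega
      exact mul_left_cancel₀ hi0 (by omega)
    exact_mod_cast this
  · exact List.nodup_range

theorem fold_set_add (J : List Int) :
    ∀ (l : List Int), (∀ x ∈ J, 0 ≤ x ∧ x.toNat < l.length) → J.Nodup →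
    ((J.foldl (fun l x => l.set x.toNat (PySem.List.pyGetD l x 0 + 1)) l).length = l.length ∧
     ∀ u : Int, 0 ≤ u → u.toNat < l.length →
       PySem.List.pyGetD (J.foldl (fun l x => l.set x.toNat (PySem.List.pyGetD l x 0 + 1)) l) u 0
         = PySem.List.pyGetD l u 0 + (if u ∈ J then 1 else 0)) := by
  induction J with
  | nil => intro l _ _; simp
  | cons x J ih =>
    intro l hb hnd
    have hx := hb x (by simp)
    have hnd' := (List.nodup_cons.mp hnd).2
    have hxJ : x ∉ J := (List.nodup_cons.mp hnd).1
    set l1 := l.set x.toNat (PySem.List.pyGetD l x 0 + 1) with hl1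
    have hlen1 : l1.length = l.length := by simp [hl1]
    have hb' : ∀ y ∈ J, 0 ≤ y ∧ y.toNat < l1.length := by
      intro y hy; rw [hlen1]; exact hb y (by simp [hy])
    obtain ⟨ihlen, ihval⟩ := ih l1 hb' hnd'
    rw [List.foldl_cons]
    constructor
    · rw [ihlen, hlen1]
    · intro u hu hul
      rw [ihval u hu (by omega)]
      have hget : PySem.List.pyGetD l1 u 0
          = PySem.List.pyGetD l u 0 + (if u = x then 1 else 0) := by
        have h1 : u < (l1.length : Int) := by rw [hlen1]; exact_mod_cast by omega
        have h2 : u < (l.length : Int) := by exact_mod_cast by omega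
        rw [PySem.List.pyGetD_eq_getElem _ _ hu h1, PySem.List.pyGetD_eq_getElem _ _ hu h2]
        simp only [hl1, List.getElem_set]
        by_cases he : u = x
        · subst he; simp [PySem.List.pyGetD_eq_getElem _ _ hu h2]
        · have hne : x.toNat ≠ u.toNat := by omega
          simp [hne, he, PySem.List.pyGetD_eq_getElem _ _ hu h2]
      rw [hget]
      by_cases he : u = x
      · subst he; simp [hxJ]
      · simp [he]

theorem sieve_outer (n : Int) :
    ∀ (I : List Int), (∀ i ∈ I, 1 ≤ i ∧ i ≤ n) → ∀ (l : List Int), l.length = (n + 1).toNat →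
    ((I.foldl (fun d i => (PySem.List.pyRange i (n + 1) i).foldl
        (fun d j => d.set j.toNat (PySem.List.pyGetD d j 0 + 1)) d) l).length = l.length ∧
     ∀ u : Int, 0 ≤ u → u.toNat < l.length →
       PySem.List.pyGetD (I.foldl (fun d i => (PySem.List.pyRange i (n + 1) i).foldl
          (fun d j => d.set j.toNat (PySem.List.pyGetD d j 0 + 1)) d) l) u 0
         = PySem.List.pyGetD l u 0
           + (I.countP (fun i => decide (u ∈ PySem.List.pyRange i (n + 1) i)) : Int)) := by
  intro I
  induction I with
  | nil => intro _ l _; simp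
  | cons i I ih =>
    intro hI l hlen
    have hi : 1 ≤ i ∧ i ≤ n := hI i (by simp)
    have hbounds : ∀ x ∈ PySem.List.pyRange i (n + 1) i, 0 ≤ x ∧ x.toNat < l.length := by
      intro x hx
      rw [mem_pyRange_step _ _ _ hi.1] at hx
      constructor
      · omega
      · rw [hlen]; omega
    obtain ⟨flen, fval⟩ := fold_set_add (PySem.List.pyRange i (n + 1) i) l hbounds
      (nodup_pyRange_step i n hi.1)
    set l1 := (PySem.List.pyRange i (n + 1) i).foldl
      (fun d j => d.set j.toNat (PySem.List.pyGetD d j 0 + 1)) l with hl1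
    obtain ⟨ilen, ival⟩ := ih (fun j hj => hI j (by simp [hj])) l1 (by rw [flen, hlen])
    rw [List.foldl_cons]
    constructor
    · rw [ilen, flen]
    · intro u hu hul
      rw [ival u hu (by rw [flen]; exact hul), fval u hu hul]
      rw [List.countP_cons]
      by_cases hmem : u ∈ PySem.List.pyRange i (n + 1) i
      · simp [hmem]; push_cast; ring
      · simp [hmem]

theorem get_divisors_eq_countP (u : Int) :
    get_divisors u
      = ((PySem.List.pyRange 1 (u + 1)).countP (fun i => PySem.Int.mod u i == 0) : Int) := by
  rw [get_divisors, PySem.List.foldl_if_add_one]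
  simp

theorem sieve_val (n u : Int) (hu1 : 1 ≤ u) (hu2 : u ≤ n) :
    PySem.List.pyGetD (sieveD n) u 0 = get_divisors u := by
  have hI : ∀ i ∈ PySem.List.pyRange 1 (n + 1), 1 ≤ i ∧ i ≤ n := by
    intro i hi; rw [PySem.List.mem_pyRange_one] at hi; omega
  have hlen : (PySem.List.pyRepeat [(0 : Int)] (n + 1)).length = (n + 1).toNat := by
    rw [PySem.List.pyRepeat_singleton]; simp
  obtain ⟨_, hval⟩ := sieve_outer n (PySem.List.pyRange 1 (n + 1)) hI _ hlen
  rw [sieveD, hval u (by omega) (by rw [hlen]; omega)]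
  have hz : PySem.List.pyGetD (PySem.List.pyRepeat [(0 : Int)] (n + 1)) u 0 = 0 := by
    rw [PySem.List.pyRepeat_singleton, PySem.List.pyGetD_of_nonneg _ _ (by omega)]
    simp [List.getD]
  rw [hz, zero_add]
  rw [PySem.List.pyRange_one_append 1 (u + 1) (n + 1) (by omega) (by omega), List.countP_append]
  have hfirst : (PySem.List.pyRange 1 (u + 1)).countP
        (fun i => decide (u ∈ PySem.List.pyRange i (n + 1) i))
      = (PySem.List.pyRange 1 (u + 1)).countP (fun i => PySem.Int.mod u i == 0) := by
    apply List.countP_congr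
    intro i hi
    rw [PySem.List.mem_pyRange_one] at hi
    simp only [decide_eq_true_eq, beq_iff_eq]
    rw [mem_pyRange_step _ _ _ (by omega), PySem.Int.mod_eq_zero_iff_dvd]
    constructor
    · rintro ⟨_, _, h⟩; exact h
    · intro h; exact ⟨Int.le_of_dvd (by omega) h, by omega, h⟩
  have hsecond : (PySem.List.pyRange (u + 1) (n + 1)).countP
        (fun i => decide (u ∈ PySem.List.pyRange i (n + 1) i)) = 0 := by
    rw [List.countP_eq_zero]
    intro i hi
    rw [PySem.List.mem_pyRange_one] at hi
    simp only [decide_eq_true_eq]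
    rw [mem_pyRange_step _ _ _ (by omega)]
    omega
  rw [hfirst, hsecond, get_divisors_eq_countP]
  simp

-- ---------- counting via the frequency dictionary ----------
theorem countP_split_eq (xs : List Int) (k : Int) (p : Int → Bool) :
    xs.countP p
      = (if p k then xs.count k else 0) + (xs.filter (fun x => x ≠ k)).countP p := by
  induction xs with
  | nil => simp
  | cons a xs ih =>
    by_cases hak : a = k
    · subst hak
      by_cases hp : p a
      · simp [List.countP_cons, hp, ih]
        omega
      · simp [List.countP_cons, List.count_cons, List.filter_cons, hp, ih]
    · by_cases hp : p a
      · simp [List.countP_cons, List.count_cons, List.filter_cons, hp, hak, ih]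
        split_ifs <;> omega
      · simp [List.countP_cons, List.count_cons, List.filter_cons, hp, hak, ih]

theorem sum_counts_filter (t : Int) :
    ∀ (ks xs : List Int), ks.Nodup → (∀ x ∈ xs, x ∈ ks) →
    (((ks.filter (fun k => decide (k > t))).map (fun k => (xs.count k : Int))).sum
      = (xs.countP (fun x => decide (x > t)) : Int)) := by
  intro ks
  induction ks with
  | nil =>
    intro xs _ hcov
    have : xs = [] := by
      cases xs with
      | nil => rfl
      | cons a l => exact absurd (hcov a (by simp)) (by simp)
    simp [this]
  | cons k ks ih =>
    intro xs hnd hcov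
    have hnd' : ks.Nodup := (List.nodup_cons.mp hnd).2
    have hknot : k ∉ ks := (List.nodup_cons.mp hnd).1
    have hcov' : ∀ x ∈ xs.filter (fun x => x ≠ k), x ∈ ks := by
      intro x hx
      rw [List.mem_filter] at hx
      rcases hcov x hx.1 |> List.mem_cons.mp with h | h
      · exact absurd h (by simpa using hx.2)
      · exact h
    have key : ((ks.filter (fun k => decide (k > t))).map (fun j => (xs.count j : Int))).sum
        = ((ks.filter (fun k => decide (k > t))).map
            (fun j => ((xs.filter (fun x => x ≠ k)).count j : Int))).sum := by
      apply congrArg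
      apply List.map_congr_left
      intro j hj
      have hjk : j ≠ k := by
        intro h; exact hknot (h ▸ (List.mem_filter.mp hj).1)
      congr 1
      rw [List.count_filter (by simp [hjk])]
    rw [countP_split_eq xs k]
    by_cases hk : (t < k)
    · rw [List.filter_cons_of_pos (by simpa using hk), List.map_cons, List.sum_cons,
          key, ih _ hnd' hcov']
      push_cast
      simp [hk]
    · rw [List.filter_cons_of_neg (by simpa using hk), key, ih _ hnd' hcov']
      simp [hk]

theorem dict_sum_eq (xs : List Int) (t : Int) :
    ((((PySem.Dict.counter xs).items.filter (fun vc => vc.1 > t)).map (fun vc => vc.2)).sum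
      = (xs.countP (fun x => decide (x > t)) : Int)) := by
  rw [PySem.Dict.items_counter, List.filter_map, List.map_map]
  have h1 : ((fun (vc : Int × Int) => decide (vc.1 > t)) ∘ (fun k => ((k : Int), (xs.count k : Int))))
      = fun k => decide (k > t) := by
    funext k; simp
  have h2 : ((fun (vc : Int × Int) => vc.2) ∘ (fun k => ((k : Int), (xs.count k : Int))))
      = fun k => (xs.count k : Int) := by
    funext k; simp
  rw [h1, h2]
  exact sum_counts_filter t (PySem.Set.ofList xs) xs (PySem.Set.nodup_ofList xs)
    (fun x hx => (PySem.Set.mem_ofList xs x).mpr hx)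

theorem counter_snoc (xs : List Int) (x : Int) :
    PySem.Dict.counter (xs ++ [x])
      = (PySem.Dict.counter xs).insert x ((PySem.Dict.counter xs).getD x 0 + 1) := by
  rw [← PySem.Dict.foldl_insert_getD_add_one_eq_counter,
      ← PySem.Dict.foldl_insert_getD_add_one_eq_counter, List.foldl_append]
  simp

-- ---------- B's loop ----------
theorem B_loop (n : Int) :
    ∀ m : Nat, (m : Int) ≤ n - 1 →
    (PySem.List.pyRange 2 (2 + (m : Int))).foldl
      (fun (st : PySem.Dict Int Int × Int × Int) i =>
        let freq := st.1
        let best := st.2.1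
        let best_count := st.2.2
        let di := PySem.List.pyGetD (sieveD n) i 0
        let w := ((freq.items.filter (fun vc => vc.1 > di)).map (fun vc => vc.2)).sum
        let bp : Int × Int :=
          if w > best then (w, 1)
          else if w == best then (best, best_count + 1)
          else (best, best_count)
        (freq.insert di (freq.getD di 0 + 1), bp))
      (PySem.Dict.empty.insert 1 1, 0, 1)
    = (PySem.Dict.counter
         (List.map get_divisors (PySem.List.pyRange 1 (2 + (m : Int)))),
       (List.map Wk (PySem.List.pyRange 2 (2 + (m : Int)))).foldl pstep (0, 1)) := by
  intro m
  induction m with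
  | zero =>
    intro _
    rw [show PySem.List.pyRange 2 (2 + ((0:Nat) : Int)) = [] from by decide]
    rw [List.foldl_nil, List.map_nil, List.foldl_nil]
    rw [show PySem.List.pyRange 1 (2 + ((0:Nat) : Int)) = [1] from by decide]
    decide
  | succ m ihm =>
    intro h
    set i : Int := 2 + (m : Int) with hidef
    have h2i : (2 : Int) ≤ i := by omega
    have hin : i ≤ n := by omega
    rw [show (2 + ((m + 1 : Nat) : Int)) = i + 1 from by omega]
    rw [PySem.List.pyRange_one_succ_right h2i, List.foldl_append, ihm (by omega)]
    rw [PySem.List.pyRange_one_succ_right (by omega : (1:Int) ≤ i), List.map_append,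
        List.map_append, List.foldl_append]
    simp only [List.foldl_cons, List.foldl_nil, List.map_cons, List.map_nil]
    rw [sieve_val n i (by omega) hin, dict_sum_eq, List.countP_map, ← counter_snoc]
    simp only [Prod.mk.injEq, true_and]
    simp only [pstep, Wk, Function.comp_def]
    split_ifs <;> simp_all

-- ---------- the running (best, count) pair ----------
theorem runpair (L : List Int) :
    ∀ b c : Int, L.foldl pstep (b, c)
      = (L.foldl max b,
         (if b = L.foldl max b then c else 0) + (L.count (L.foldl max b) : Int)) := by
  induction L with
  | nil => intro b c; simp
  | cons w L ih =>
    intro b c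
    rw [List.foldl_cons, List.foldl_cons]
    have hcnt : ∀ M : Int, ((w :: L).count M : Int)
        = (L.count M : Int) + (if w = M then 1 else 0) := by
      intro M
      by_cases h : w = M <;> simp [List.count_cons, h]
    have hle : max b w ≤ List.foldl max (max b w) L := (PySem.List.le_foldl_max L (max b w)).1
    by_cases h1 : w > b
    · have hb : max b w = w := by omega
      rw [show pstep (b, c) w = (w, 1) from by simp [pstep, h1], ih w 1]
      rw [hb]
      have hbM : ¬ b = List.foldl max w L := by rw [hb] at hle; omega
      simp only [Prod.mk.injEq, true_and, if_neg hbM]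
      rw [hcnt]
      split_ifs <;> omega
    · by_cases h2 : w = b
      · subst h2
        rw [show pstep (w, c) w = (w, c + 1) from by simp [pstep]]
        rw [ih w (c + 1)]
        simp only [max_self]
        simp only [Prod.mk.injEq, true_and]
        rw [hcnt]
        split_ifs <;> omega
      · have hb : max b w = b := by omega
        rw [show pstep (b, c) w = (b, c) from by simp [pstep, h1, h2], ih b c]
        rw [hb]
        simp only [Prod.mk.injEq, true_and]
        have hwM : ¬ w = List.foldl max b L := by rw [hb] at hle; omega
        rw [hcnt, if_neg hwM]
        omega

-- ---------- the final extraction step ----------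
theorem final_eq (ws : List Int) :
    ([ (match PySem.List.max? ((-1 : Int) :: 0 :: (ws ++ [-1])) (fun x => x) with
        | some m => m | none => 0),
      (PySem.List.count ((-1 : Int) :: 0 :: (ws ++ [-1]))
        (match PySem.List.max? ((-1 : Int) :: 0 :: (ws ++ [-1])) (fun x => x) with
         | some m => m | none => 0) : Int) ] : List Int)
    = [ (ws.foldl pstep (0, 1)).1, (ws.foldl pstep (0, 1)).2 ] := by
  have hM0 : (0:Int) ≤ List.foldl max 0 ws := (PySem.List.le_foldl_max ws 0).1
  have hmax : List.foldl max (-1 : Int) (0 :: (ws ++ [-1])) = List.foldl max 0 ws := by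
    rw [List.foldl_cons, show max (-1 : Int) 0 = 0 from by norm_num, List.foldl_append,
        List.foldl_cons, List.foldl_nil]
    omega
  rw [PySem.List.max?_id_cons, hmax]
  rw [runpair ws 0 1]
  simp only []
  have hcnt : (PySem.List.count ((-1 : Int) :: 0 :: (ws ++ [-1])) (List.foldl max 0 ws) : Int)
      = (if (0:Int) = List.foldl max 0 ws then 1 else 0)
        + (ws.count (List.foldl max 0 ws) : Int) := by
    show ((((-1 : Int) :: 0 :: (ws ++ [-1])).count (List.foldl max 0 ws) : Int)) = _
    rw [List.count_cons, List.count_cons, List.count_append]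
    have h1 : ¬ ((-1 : Int) == List.foldl max 0 ws) := by
      simp only [beq_iff_eq]; omega
    have h2 : ([(-1 : Int)].count (List.foldl max 0 ws)) = 0 := by
      simp [List.count_singleton]
      omega
    simp only [h2, h1]
    by_cases h3 : (0:Int) = List.foldl max 0 ws
    · rw [if_pos h3]
      simp [← h3]
      omega
    · rw [if_neg h3]
      have : ¬ ((0:Int) == List.foldl max 0 ws) := by simpa using h3
      simp [this]
  rw [hcnt]

-- ===== VERDICT (by name: the statement is the Claim_ definition above) =====
theorem weakNumbers_spec : Claim_equal_weakNumbers := by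
  unfold Claim_equal_weakNumbers
  intro n _ hpre
  unfold Spec_weakNumbers
  have h0n : (0:Int) ≤ n := hpre
  by_cases h0 : n = 0
  · subst h0; decide
  · have hn : (1:Int) ≤ n := by omega
    -- A's loop, fully run
    have hA := A_loop n hn (n - 1).toNat (by omega)
    rw [show (((n - 1).toNat : Nat) : Int) = n - 1 from by omega,
        show (2 : Int) + (n - 1) = n + 1 from by ring,
        show (n - (n - 1)).toNat = 1 from by omega, List.replicate_one] at hA
    -- B's loop, fully run
    have hB := B_loop n (n - 1).toNat (by omega)
    rw [show (((n - 1).toNat : Nat) : Int) = n - 1 from by omega,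
        show (2 : Int) + (n - 1) = n + 1 from by ring] at hB
    have eA : weakNumbers n
        = [ (match PySem.List.max? (((PySem.List.pyRange 2 (n + 1)).foldl
              (fun (st : List Int × List Int) i =>
                let divisors := st.1.set i.toNat (get_divisors i)
                let count := (PySem.List.pyRange 1 i).foldl
                  (fun count j =>
                    if PySem.List.pyGetD divisors j 0 > PySem.List.pyGetD divisors i 0 then count + 1
                    else count) 0
                (divisors, st.2.set i.toNat count))
              ((PySem.List.pyRepeat [(-1 : Int)] (n + 2)).set 1 1,
               (PySem.List.pyRepeat [(-1 : Int)] (n + 2)).set 1 0)).2) (fun x => x) with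
            | some m => m | none => 0),
            (PySem.List.count (((PySem.List.pyRange 2 (n + 1)).foldl
              (fun (st : List Int × List Int) i =>
                let divisors := st.1.set i.toNat (get_divisors i)
                let count := (PySem.List.pyRange 1 i).foldl
                  (fun count j =>
                    if PySem.List.pyGetD divisors j 0 > PySem.List.pyGetD divisors i 0 then count + 1
                    else count) 0
                (divisors, st.2.set i.toNat count))
              ((PySem.List.pyRepeat [(-1 : Int)] (n + 2)).set 1 1,
               (PySem.List.pyRepeat [(-1 : Int)] (n + 2)).set 1 0)).2)
              (match PySem.List.max? (((PySem.List.pyRange 2 (n + 1)).foldl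
                (fun (st : List Int × List Int) i =>
                  let divisors := st.1.set i.toNat (get_divisors i)
                  let count := (PySem.List.pyRange 1 i).foldl
                    (fun count j =>
                      if PySem.List.pyGetD divisors j 0 > PySem.List.pyGetD divisors i 0 then count + 1
                      else count) 0
                  (divisors, st.2.set i.toNat count))
                ((PySem.List.pyRepeat [(-1 : Int)] (n + 2)).set 1 1,
                 (PySem.List.pyRepeat [(-1 : Int)] (n + 2)).set 1 0)).2) (fun x => x) with
              | some m => m | none => 0) : Int) ] := rfl
    have eB : weakNumbers_alt n
        = [ ((PySem.List.pyRange 2 (n + 1)).foldl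
              (fun (st : PySem.Dict Int Int × Int × Int) i =>
                let freq := st.1
                let best := st.2.1
                let best_count := st.2.2
                let di := PySem.List.pyGetD (sieveD n) i 0
                let w := ((freq.items.filter (fun vc => vc.1 > di)).map (fun vc => vc.2)).sum
                let bp : Int × Int :=
                  if w > best then (w, 1)
                  else if w == best then (best, best_count + 1)
                  else (best, best_count)
                (freq.insert di (freq.getD di 0 + 1), bp))
              (PySem.Dict.empty.insert 1 1, 0, 1)).2.1,
            ((PySem.List.pyRange 2 (n + 1)).foldl
              (fun (st : PySem.Dict Int Int × Int × Int) i =>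
                let freq := st.1
                let best := st.2.1
                let best_count := st.2.2
                let di := PySem.List.pyGetD (sieveD n) i 0
                let w := ((freq.items.filter (fun vc => vc.1 > di)).map (fun vc => vc.2)).sum
                let bp : Int × Int :=
                  if w > best then (w, 1)
                  else if w == best then (best, best_count + 1)
                  else (best, best_count)
                (freq.insert di (freq.getD di 0 + 1), bp))
              (PySem.Dict.empty.insert 1 1, 0, 1)).2.2 ] := rfl
    rw [eA, hA, eB, hB]
    exact final_eq (List.map Wk (PySem.List.pyRange 2 (n + 1)))
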